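-- pv_equiv track=rewrite | github.com/Arkronus/Python_lessons_basic | lesson04/home_work/hw04_hard.py | calculate_threatened_squares
-- ===== SOURCE A (Python) =====
-- def calculate_threatened_squares(queen_position):
--     '''
--     Возвращает множество кортежей, куда может сходить ферзь
--     '''
--     x, y = queen_position
--     squares = set()
--     # добавляем клетки по вертикали и горизонтали
--     squares.update([(x, i+1) for i in range(0,7)])
--     squares.update([(i+1, y) for i in range(0,7)])
--
--     # добавляем клетки по диагоналям
--     for dir_shift in [[1,1], [-1,1], [1, -1], [-1,-1]]:
--         x_sq, y_sq = x, y
--         while True: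
--             x_sq += dir_shift[0]
--             y_sq += dir_shift[1]
--             if x_sq < 0 or x_sq > 8 or y_sq < 0 or y_sq > 8:
--                 break
--             new_position = (x_sq, y_sq)
--             squares.update([new_position])
--     return squares
-- ===== SOURCE B (Python) =====
-- def calculate_threatened_squares(queen_position):
--     '''
--     Возвращает множество кортежей, куда может сходить ферзь
--     '''
--     x, y = queen_position
--
--     def ray(px, py, dx, dy):
--         # recursively defined ray: the next square, then the rest of the ray
--         nx, ny = px + dx, py + dy
--         if 0 <= nx <= 8 and 0 <= ny <= 8:
--             return [(nx, ny)] + ray(nx, ny, dx, dy)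
--         return []
--
--     cells = [(x, j) for j in range(1, 8)] \
--         + [(i, y) for i in range(1, 8)] \
--         + [c for d in [(1, 1), (-1, 1), (1, -1), (-1, -1)] for c in ray(x, y, d[0], d[1])]
--     return set(cells)
-- ===== Notes on version B (the rewrite author's own statement) =====
-- stated objective: alternative
-- what changed: A's mutable set built by incremental update calls and four while-loops that move a cursor and break off-board is replaced by a pure staged construction: rays defined by structural recursion, one concatenated list of row/column/diagonal cells, and a single set() deduplication at the end.
import Mathlib
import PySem

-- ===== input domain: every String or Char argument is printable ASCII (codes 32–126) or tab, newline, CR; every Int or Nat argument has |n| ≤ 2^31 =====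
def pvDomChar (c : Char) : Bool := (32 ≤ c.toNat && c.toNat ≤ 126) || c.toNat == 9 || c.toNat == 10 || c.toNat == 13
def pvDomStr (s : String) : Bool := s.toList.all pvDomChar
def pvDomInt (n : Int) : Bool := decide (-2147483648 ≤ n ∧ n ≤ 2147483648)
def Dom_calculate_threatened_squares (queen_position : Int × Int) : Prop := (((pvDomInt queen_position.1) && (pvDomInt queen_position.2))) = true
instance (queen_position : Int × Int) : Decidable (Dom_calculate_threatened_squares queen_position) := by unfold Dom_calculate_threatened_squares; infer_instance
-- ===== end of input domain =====

-- B replaces A's mutable set with incremental updates and four cursor-moving while-loops by a pure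
-- staged construction (recursive rays, one concatenated cell list, one final set() dedup); same cost.

-- ===== PORT A =====
-- A's 'while True' walk for one direction. The loop moves one square per iteration and breaks as
-- soon as the cursor leaves 0..8 in either coordinate, so it never runs more than 10 iterations:
-- fuel 10 is exact (the walk adds at most 9 in-board squares, then the breaking check).
def pvWalkA (fuel : Nat) (dx dy x_sq y_sq : Int) (squares : PySem.Set (Int × Int)) :
    PySem.Set (Int × Int) :=
  match fuel with
  | 0 => squares
  | n + 1 =>
    let x' := x_sq + dx
    let y' := y_sq + dy
    if x' < 0 ∨ x' > 8 ∨ y' < 0 ∨ y' > 8 then squares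
    else pvWalkA n dx dy x' y' (PySem.Set.add squares (x', y'))

def calculate_threatened_squares (queen_position : Int × Int) : List (Int × Int) :=
  let x := queen_position.1
  let y := queen_position.2
  let squares : PySem.Set (Int × Int) := PySem.Set.empty
  let squares := PySem.Set.update squares
    ((PySem.List.pyRange 0 7 1).map (fun i => (x, i + 1)))
  let squares := PySem.Set.update squares
    ((PySem.List.pyRange 0 7 1).map (fun i => (i + 1, y)))
  [((1 : Int), (1 : Int)), (-1, 1), (1, -1), (-1, -1)].foldl
    (fun sq dir_shift => pvWalkA 10 dir_shift.1 dir_shift.2 x y sq) squares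

-- ===== PORT B =====
-- B's recursive 'ray': a ray holds at most 9 on-board squares before the recursion stops, so
-- fuel 10 is exact.
def pvRayB (fuel : Nat) (px py dx dy : Int) : List (Int × Int) :=
  match fuel with
  | 0 => []
  | n + 1 =>
    if 0 ≤ px + dx ∧ px + dx ≤ 8 ∧ 0 ≤ py + dy ∧ py + dy ≤ 8 then
      (px + dx, py + dy) :: pvRayB n (px + dx) (py + dy) dx dy
    else []

def calculate_threatened_squares_alt (queen_position : Int × Int) : List (Int × Int) :=
  let x := queen_position.1
  let y := queen_position.2
  let cells :=
    (PySem.List.pyRange 1 8 1).map (fun j => (x, j))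
    ++ (PySem.List.pyRange 1 8 1).map (fun i => (i, y))
    ++ ([((1 : Int), (1 : Int)), (-1, 1), (1, -1), (-1, -1)].flatMap
          (fun d => pvRayB 10 x y d.1 d.2))
  PySem.Set.ofList cells

-- ===== PRECONDITION & SPEC =====
def Spec_calculate_threatened_squares (queen_position : Int × Int) (out : List (Int × Int)) : Prop := out = calculate_threatened_squares_alt queen_position
instance (queen_position : Int × Int) (out : List (Int × Int)) : Decidable (Spec_calculate_threatened_squares queen_position out) := by unfold Spec_calculate_threatened_squares; infer_instance

-- ===== CLAIM (what is proved, stated in full; the proofs are below) =====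
def Claim_equal_calculate_threatened_squares : Prop := ∀ (queen_position : Int × Int), Dom_calculate_threatened_squares queen_position → Spec_calculate_threatened_squares queen_position (calculate_threatened_squares queen_position)

-- ===== LEMMAS AND PROOFS =====

-- A's walk over one direction inserts exactly B's ray, in the same order
lemma pvWalkA_eq_update (fuel : Nat) (dx dy : Int) :
    ∀ (x y : Int) (sq : PySem.Set (Int × Int)),
      pvWalkA fuel dx dy x y sq = PySem.Set.update sq (pvRayB fuel x y dx dy) := by
  induction fuel with
  | zero => intro x y sq; rfl
  | succ n ih =>
    intro x y sq
    simp only [pvWalkA, pvRayB]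
    by_cases h : 0 ≤ x + dx ∧ x + dx ≤ 8 ∧ 0 ≤ y + dy ∧ y + dy ≤ 8
    · rw [if_neg (by omega), if_pos h, ih]
      simp [PySem.Set.update]
    · rw [if_pos (by omega), if_neg h]
      rfl

lemma set_update_append {α : Type} [BEq α] (s : PySem.Set α) (a b : List α) :
    PySem.Set.update s (a ++ b) = PySem.Set.update (PySem.Set.update s a) b := by
  simp [PySem.Set.update, List.foldl_append]

lemma set_ofList_eq_update {α : Type} [BEq α] (xs : List α) :
    PySem.Set.ofList xs = PySem.Set.update PySem.Set.empty xs := rfl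

lemma hv_row (x : Int) :
    (PySem.List.pyRange 0 7 1).map (fun i => (x, i + 1))
      = (PySem.List.pyRange 1 8 1).map (fun j => (x, j)) := by
  have h0 : PySem.List.pyRange 0 7 1 = [0, 1, 2, 3, 4, 5, 6] := by decide
  have h1 : PySem.List.pyRange 1 8 1 = [1, 2, 3, 4, 5, 6, 7] := by decide
  rw [h0, h1]; simp

lemma hv_col (y : Int) :
    (PySem.List.pyRange 0 7 1).map (fun i => (i + 1, y))
      = (PySem.List.pyRange 1 8 1).map (fun i => (i, y)) := by
  have h0 : PySem.List.pyRange 0 7 1 = [0, 1, 2, 3, 4, 5, 6] := by decide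
  have h1 : PySem.List.pyRange 1 8 1 = [1, 2, 3, 4, 5, 6, 7] := by decide
  rw [h0, h1]; simp

-- ===== VERDICT (by name: the statement is the Claim_ definition above) =====
theorem calculate_threatened_squares_spec : Claim_equal_calculate_threatened_squares := by
  intro qp _
  show _ = _
  unfold calculate_threatened_squares calculate_threatened_squares_alt
  simp only [List.foldl, List.flatMap_cons, List.flatMap_nil, List.append_nil]
  rw [pvWalkA_eq_update, pvWalkA_eq_update, pvWalkA_eq_update, pvWalkA_eq_update]
  rw [set_ofList_eq_update]
  rw [set_update_append, set_update_append, set_update_append, set_update_append,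
    set_update_append]
  rw [hv_row, hv_col]
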